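-- pv_equiv track=rewrite | github.com/wl55721/modeling | python/zrt/graph/graph_exporter.py | _split_shape_list
-- ===== SOURCE A (Python) =====
-- from typing import Any, Dict, List, Optional
--
-- def _split_shape_list(s: str) -> List[str]:
--     """Split '[1, 128], [64]' into ['[1, 128]', '[64]']."""
--     if not s:
--         return []
--     result: List[str] = []
--     depth = 0
--     current: List[str] = []
--     for ch in s:
--         if ch == "[":
--             depth += 1
--             current.append(ch)
--         elif ch == "]":
--             depth -= 1
--             current.append(ch)
--         elif ch == "," and depth == 0:
--             result.append("".join(current).strip())
--             current = []
--         else: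
--             current.append(ch)
--     if current:
--         result.append("".join(current).strip())
--     return result
-- ===== SOURCE B (Python) =====
-- from typing import List
--
--
-- def _split_shape_list(s: str) -> List[str]:
--     """Split '[1, 128], [64]' into ['[1, 128]', '[64]']."""
--     if not s:
--         return []
--     depth = 0
--     cuts: List[int] = []
--     for i, ch in enumerate(s):
--         if ch == "[":
--             depth += 1
--         elif ch == "]":
--             depth -= 1
--         elif ch == "," and depth == 0:
--             cuts.append(i)
--     starts = [0] + [c + 1 for c in cuts]
--     ends = cuts + [len(s)]
--     parts = [s[a:b].strip() for a, b in zip(starts, ends)]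
--     if cuts and cuts[-1] == len(s) - 1:
--         parts.pop()
--     return parts
-- ===== Notes on version B (the rewrite author's own statement) =====
-- stated objective: alternative
-- what changed: B makes one pass that only records the indices of top-level commas and then slices the string between consecutive split points (popping the final slice when it is length-zero), instead of A's single pass that accumulates characters of the current segment and flushes the buffer at each top-level comma.
import Mathlib
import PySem

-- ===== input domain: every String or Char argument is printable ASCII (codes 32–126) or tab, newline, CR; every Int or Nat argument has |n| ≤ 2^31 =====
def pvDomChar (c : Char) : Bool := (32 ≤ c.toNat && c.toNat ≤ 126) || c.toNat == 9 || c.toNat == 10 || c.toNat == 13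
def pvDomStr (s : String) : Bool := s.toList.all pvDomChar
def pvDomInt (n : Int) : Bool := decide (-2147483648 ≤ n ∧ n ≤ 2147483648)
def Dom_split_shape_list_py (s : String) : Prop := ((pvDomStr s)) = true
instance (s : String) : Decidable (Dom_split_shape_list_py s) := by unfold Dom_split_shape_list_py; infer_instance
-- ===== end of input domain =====

-- B records top-level-comma indices in one pass and slices between them, instead of A's
-- character-accumulating buffer; same cost, different decomposition ("alternative").


-- ===== PORT A =====
-- the body of A's for-loop, as the step of a fold over (result, depth, current)
def stepA (acc : List String × Int × List Char) (ch : Char) : List String × Int × List Char :=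
  if ch = '[' then (acc.1, acc.2.1 + 1, acc.2.2 ++ [ch])
  else if ch = ']' then (acc.1, acc.2.1 - 1, acc.2.2 ++ [ch])
  else if ch = ',' ∧ acc.2.1 = 0 then
    (acc.1 ++ [String.ofList (PySem.Chars.strip acc.2.2)], acc.2.1, [])
  else (acc.1, acc.2.1, acc.2.2 ++ [ch])

def split_shape_list_py (s : String) : List String :=
  if s.toList = [] then []
  else
    let fin := s.toList.foldl stepA ([], 0, [])
    if fin.2.2 ≠ [] then fin.1 ++ [String.ofList (PySem.Chars.strip fin.2.2)] else fin.1

-- ===== PORT B =====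
-- the body of B's for-loop over enumerate(s): collect indices of depth-0 commas
def stepB (acc : Int × List Int) (ic : Int × Char) : Int × List Int :=
  if ic.2 = '[' then (acc.1 + 1, acc.2)
  else if ic.2 = ']' then (acc.1 - 1, acc.2)
  else if ic.2 = ',' ∧ acc.1 = 0 then (acc.1, acc.2 ++ [ic.1])
  else acc

def split_shape_list_py_alt (s : String) : List String :=
  if s.toList = [] then []
  else
    let l := s.toList
    let cuts := ((PySem.List.enumerate l 0).foldl stepB (0, [])).2
    let starts := (0 : Int) :: cuts.map (· + 1)
    let ends := cuts ++ [(l.length : Int)]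
    let parts := (starts.zip ends).map
      (fun ab => String.ofList (PySem.Chars.strip (PySem.List.slice l (some ab.1) (some ab.2))))
    if cuts.getLast? = some ((l.length : Int) - 1) then parts.dropLast else parts

-- ===== PRECONDITION & SPEC =====
def Spec_split_shape_list_py (s : String) (out : List String) : Prop := out = split_shape_list_py_alt s
instance (s : String) (out : List String) : Decidable (Spec_split_shape_list_py s out) := by unfold Spec_split_shape_list_py; infer_instance

-- ===== CLAIM (what is proved, stated in full; the proofs are below) =====
def Claim_equal_split_shape_list_py : Prop := ∀ (s : String), Dom_split_shape_list_py s → Spec_split_shape_list_py s (split_shape_list_py s)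

-- ===== LEMMAS AND PROOFS =====

def mkstrip (cs : List Char) : String := String.ofList (PySem.Chars.strip cs)

-- A's result as structural recursion on the character list
def specA : List Char → Int → List Char → List String
  | [], _, cur => if cur = [] then [] else [mkstrip cur]
  | c :: t, d, cur =>
    if c = '[' then specA t (d + 1) (cur ++ [c])
    else if c = ']' then specA t (d - 1) (cur ++ [c])
    else if c = ',' ∧ d = 0 then mkstrip cur :: specA t d []
    else specA t d (cur ++ [c])

-- indices of depth-0 commas, as Nat, relative to the current suffix
def cutsAux : List Char → Int → List Nat
  | [], _ => []
  | c :: t, d =>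
    if c = '[' then (cutsAux t (d + 1)).map (· + 1)
    else if c = ']' then (cutsAux t (d - 1)).map (· + 1)
    else if c = ',' ∧ d = 0 then 0 :: (cutsAux t d).map (· + 1)
    else (cutsAux t d).map (· + 1)

def depthF : List Char → Int → Int
  | [], d => d
  | c :: t, d =>
    if c = '[' then depthF t (d + 1)
    else if c = ']' then depthF t (d - 1)
    else depthF t d

def headCons (c : Char) : List (List Char) → List (List Char)
  | [] => [[c]]
  | h :: r => (c :: h) :: r

-- raw segments between top-level commas, built recursively
def segsRec : List Char → Int → List (List Char)
  | [], _ => [[]]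
  | c :: t, d =>
    if c = '[' then headCons c (segsRec t (d + 1))
    else if c = ']' then headCons c (segsRec t (d - 1))
    else if c = ',' ∧ d = 0 then [] :: segsRec t d
    else headCons c (segsRec t d)

def finish : List Char → List (List Char) → List String
  | cur, [] => if cur = [] then [] else [mkstrip cur]
  | cur, [h] => if cur ++ h = [] then [] else [mkstrip (cur ++ h)]
  | cur, h :: h' :: r => mkstrip (cur ++ h) :: finish [] (h' :: r)

def natSeg (l : List Char) (ab : Nat × Nat) : List Char := (l.drop ab.1).take (ab.2 - ab.1)

-- B's segments: slices of l between consecutive split points given by cs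
def bSegs (l : List Char) (cs : List Nat) : List (List Char) :=
  ((0 :: cs.map (· + 1)).zip (cs ++ [l.length])).map (natSeg l)

def finA (p : List String × Int × List Char) : List String :=
  if p.2.2 ≠ [] then p.1 ++ [mkstrip p.2.2] else p.1

lemma foldA_spec (l : List Char) : ∀ (res : List String) (d : Int) (cur : List Char),
    finA (l.foldl stepA (res, d, cur)) = res ++ specA l d cur := by
  induction l with
  | nil =>
    intro res d cur
    by_cases h : cur = [] <;> simp [finA, specA, h]
  | cons c t ih =>
    intro res d cur
    simp only [List.foldl_cons, stepA, specA]
    split_ifs with h1 h2 h3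
    · exact ih _ _ _
    · exact ih _ _ _
    · rw [ih]; simp [mkstrip]
    · exact ih _ _ _

lemma map_shift (cs : List Nat) (k : Int) :
    (cs.map (· + 1)).map (fun n : Nat => k + (n : Int)) = cs.map (fun n : Nat => k + 1 + (n : Int)) := by
  rw [List.map_map]
  apply List.map_congr_left
  intro n _
  simp only [Function.comp_apply]
  push_cast
  ring

lemma foldB_spec (l : List Char) : ∀ (d : Int) (acc : List Int) (k : Int),
    (PySem.List.enumerate l k).foldl stepB (d, acc)
      = (depthF l d, acc ++ (cutsAux l d).map (fun n : Nat => k + (n : Int))) := by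
  induction l with
  | nil => intro d acc k; simp [PySem.List.enumerate_nil, cutsAux, depthF]
  | cons c t ih =>
    intro d acc k
    rw [PySem.List.enumerate_cons]
    simp only [List.foldl_cons, stepB, cutsAux, depthF]
    split_ifs with h1 h2 h3
    · rw [ih, map_shift]
    · rw [ih, map_shift]
    · rw [ih, List.map_cons, map_shift, Prod.mk.injEq]
      refine ⟨rfl, ?_⟩
      simp
    · rw [ih, map_shift]

lemma seg_shift (c : Char) (t : List Char) (as' es : List Nat) :
    ((as'.map (· + 1)).zip (es.map (· + 1))).map (natSeg (c :: t))
      = (as'.zip es).map (natSeg t) := by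
  rw [List.zip_map, List.map_map]
  apply List.map_congr_left
  rintro ⟨a, b⟩ _
  simp [natSeg, Nat.succ_sub_succ]

lemma bSegs_headCons (c : Char) (t : List Char) (cs : List Nat) :
    bSegs (c :: t) (cs.map (· + 1)) = headCons c (bSegs t cs) := by
  cases cs with
  | nil => simp [bSegs, natSeg, headCons]
  | cons i cs' =>
    unfold bSegs headCons
    simp only [List.map_cons, List.cons_append, List.zip_cons_cons, List.length_cons]
    congr 1
    have := seg_shift c t ((i + 1) :: cs'.map (· + 1)) (cs' ++ [t.length])
    simpa using this

lemma bSegs_cuts (l : List Char) : ∀ (d : Int), bSegs l (cutsAux l d) = segsRec l d := by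
  induction l with
  | nil => intro d; simp [bSegs, cutsAux, segsRec, natSeg]
  | cons c t ih =>
    intro d
    simp only [cutsAux, segsRec]
    split_ifs with h1 h2 h3
    · rw [bSegs_headCons, ih]
    · rw [bSegs_headCons, ih]
    · unfold bSegs
      simp only [List.map_cons, List.cons_append, List.zip_cons_cons, List.length_cons]
      congr 1
      have := seg_shift c t (0 :: (cutsAux t d).map (· + 1)) (cutsAux t d ++ [t.length])
      rw [← ih d]
      unfold bSegs
      simpa using this
    · rw [bSegs_headCons, ih]

lemma headCons_ne_nil (c : Char) (ss : List (List Char)) : headCons c ss ≠ [] := by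
  cases ss <;> simp [headCons]

lemma segsRec_ne_nil (l : List Char) (d : Int) : segsRec l d ≠ [] := by
  cases l with
  | nil => simp [segsRec]
  | cons c t =>
    simp only [segsRec]
    split_ifs <;> first | exact headCons_ne_nil _ _ | simp

lemma finish_headCons (cur : List Char) (c : Char) (ss : List (List Char)) :
    finish cur (headCons c ss) = finish (cur ++ [c]) ss := by
  rcases ss with _ | ⟨h, _ | ⟨h', r⟩⟩ <;> simp [finish, headCons]

lemma specA_finish (l : List Char) : ∀ (d : Int) (cur : List Char),
    specA l d cur = finish cur (segsRec l d) := by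
  induction l with
  | nil =>
    intro d cur
    by_cases h : cur = [] <;> simp [specA, segsRec, finish, h]
  | cons c t ih =>
    intro d cur
    simp only [specA, segsRec]
    split_ifs with h1 h2 h3
    · rw [ih, ← finish_headCons]
    · rw [ih, ← finish_headCons]
    · obtain ⟨h', r, e⟩ := List.exists_cons_of_ne_nil (segsRec_ne_nil t d)
      rw [e]
      simp only [finish, List.append_nil]
      rw [ih, e]
    · rw [ih, ← finish_headCons]

lemma finish_pop : ∀ (ss : List (List Char)), ss ≠ [] →
    finish [] ss = if ss.getLast? = some [] then (ss.map mkstrip).dropLast else ss.map mkstrip := by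
  intro ss
  induction ss with
  | nil => intro h; exact absurd rfl h
  | cons h tail ih =>
    intro _
    cases tail with
    | nil => by_cases hh : h = [] <;> simp [finish, hh]
    | cons h' r =>
      simp only [finish, List.nil_append, List.getLast?_cons_cons, List.map_cons]
      rw [ih (List.cons_ne_nil _ _)]
      split_ifs with hc
      · simp [List.dropLast_cons₂]
      · rfl

lemma zip_last (L : Nat) : ∀ (cs : List Nat) (a g : Nat), cs.getLast? = some g →
    ((a :: cs.map (· + 1)).zip (cs ++ [L])).getLast? = some (g + 1, L) := by
  intro cs
  induction cs with
  | nil => intro a g h; simp at h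
  | cons i cs' ih =>
    intro a g h
    cases cs' with
    | nil =>
      simp only [List.getLast?_singleton, Option.some.injEq] at h
      subst h
      simp [List.zip_cons_cons]
    | cons j r =>
      rw [List.getLast?_cons_cons] at h
      have hrec := ih (i + 1) g h
      simp only [List.map_cons, List.cons_append, List.zip_cons_cons] at hrec ⊢
      rw [List.getLast?_cons_cons]
      exact hrec

lemma bSegs_last (l : List Char) (cs : List Nat) (g : Nat) (h : cs.getLast? = some g) :
    (bSegs l cs).getLast? = some (l.drop (g + 1)) := by
  unfold bSegs
  rw [List.getLast?_map, zip_last l.length cs 0 g h]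
  simp only [Option.map_some, natSeg, Option.some.injEq]
  exact List.take_of_length_le (by simp)

lemma cutsAux_lt (l : List Char) : ∀ (d : Int) (i : Nat), i ∈ cutsAux l d → i < l.length := by
  induction l with
  | nil => intro d i h; simp [cutsAux] at h
  | cons c t ih =>
    intro d i h
    simp only [cutsAux] at h
    split_ifs at h
    · obtain ⟨j, hj, rfl⟩ := List.mem_map.1 h
      have := ih _ j hj; simp; omega
    · obtain ⟨j, hj, rfl⟩ := List.mem_map.1 h
      have := ih _ j hj; simp; omega
    · rcases List.mem_cons.1 h with rfl | hm
      · simp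
      · obtain ⟨j, hj, rfl⟩ := List.mem_map.1 hm
        have := ih _ j hj; simp; omega
    · obtain ⟨j, hj, rfl⟩ := List.mem_map.1 h
      have := ih _ j hj; simp; omega

lemma pop_eq_finish (l : List Char) (hl : l ≠ []) :
    (if ((cutsAux l 0).map (fun n : Nat => (n : Int))).getLast? = some ((l.length : Int) - 1)
      then ((bSegs l (cutsAux l 0)).map mkstrip).dropLast
      else (bSegs l (cutsAux l 0)).map mkstrip)
    = finish [] (bSegs l (cutsAux l 0)) := by
  have hne : bSegs l (cutsAux l 0) ≠ [] := by
    rw [bSegs_cuts]; exact segsRec_ne_nil l 0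
  rw [finish_pop _ hne, List.getLast?_map]
  cases hg : (cutsAux l 0).getLast? with
  | none =>
    have hnil : cutsAux l 0 = [] := List.getLast?_eq_none_iff.1 hg
    have hlast : (bSegs l (cutsAux l 0)).getLast? = some l := by
      simp [hnil, bSegs, natSeg]
    rw [hlast]
    simp [hl]
  | some g =>
    have hglt : g < l.length := cutsAux_lt l 0 g (List.mem_of_getLast? hg)
    rw [bSegs_last l _ g hg]
    have hiff : (some ((g : Nat) : Int) = some ((l.length : Int) - 1)) ↔ (some (l.drop (g + 1)) = some ([] : List Char)) := by
      simp only [Option.some.injEq]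
      rw [List.drop_eq_nil_iff]
      omega
    split_ifs with h1 h2 h2
    · rfl
    · exact absurd (hiff.1 h1) h2
    · exact absurd (hiff.2 h2) h1
    · rfl

lemma parts_eq (l : List Char) (cs : List Nat) :
    (((0 : Int) :: ((cs.map (fun n : Nat => (n : Int))).map (· + 1))).zip
        ((cs.map (fun n : Nat => (n : Int))) ++ [(l.length : Int)])).map
      (fun ab => String.ofList (PySem.Chars.strip (PySem.List.slice l (some ab.1) (some ab.2))))
    = (bSegs l cs).map mkstrip := by
  have e1 : ((0 : Int) :: ((cs.map (fun n : Nat => (n : Int))).map (· + 1)))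
      = ((0 :: cs.map (· + 1)).map (fun n : Nat => (n : Int))) := by
    simp only [List.map_cons, List.map_map, Nat.cast_zero]
    congr 1
  have e2 : ((cs.map (fun n : Nat => (n : Int))) ++ [(l.length : Int)])
      = ((cs ++ [l.length]).map (fun n : Nat => (n : Int))) := by simp
  rw [e1, e2, List.zip_map, List.map_map]
  unfold bSegs
  rw [List.map_map]
  apply List.map_congr_left
  rintro ⟨a, b⟩ _
  simp only [Function.comp_apply, Prod.map_apply]
  rw [PySem.List.slice_natCast]
  rfl

-- ===== VERDICT (by name: the statement is the Claim_ definition above) =====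
theorem split_shape_list_py_spec : Claim_equal_split_shape_list_py := by
  intro s _
  unfold Spec_split_shape_list_py
  by_cases hs : s.toList = []
  · simp [split_shape_list_py, split_shape_list_py_alt, hs]
  · have hA : split_shape_list_py s = specA s.toList 0 [] := by
      have h := foldA_spec s.toList [] 0 []
      simp only [List.nil_append] at h
      rw [← h]
      simp [split_shape_list_py, hs, finA, mkstrip]
    have hc2 : ((PySem.List.enumerate s.toList 0).foldl stepB (0, [])).2
        = (cutsAux s.toList 0).map (fun n : Nat => (n : Int)) := by
      rw [foldB_spec]
      simp
    have hB : split_shape_list_py_alt s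
        = (if ((cutsAux s.toList 0).map (fun n : Nat => (n : Int))).getLast?
              = some ((s.toList.length : Int) - 1)
            then ((bSegs s.toList (cutsAux s.toList 0)).map mkstrip).dropLast
            else (bSegs s.toList (cutsAux s.toList 0)).map mkstrip) := by
      unfold split_shape_list_py_alt
      rw [if_neg hs]
      show (if (((PySem.List.enumerate s.toList 0).foldl stepB (0, [])).2).getLast?
              = some ((s.toList.length : Int) - 1)
            then ((((0 : Int) :: ((((PySem.List.enumerate s.toList 0).foldl stepB (0, [])).2).map (· + 1))).zip
                    ((((PySem.List.enumerate s.toList 0).foldl stepB (0, [])).2) ++ [(s.toList.length : Int)])).map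
                  (fun ab => String.ofList (PySem.Chars.strip (PySem.List.slice s.toList (some ab.1) (some ab.2))))).dropLast
            else (((0 : Int) :: ((((PySem.List.enumerate s.toList 0).foldl stepB (0, [])).2).map (· + 1))).zip
                    ((((PySem.List.enumerate s.toList 0).foldl stepB (0, [])).2) ++ [(s.toList.length : Int)])).map
                  (fun ab => String.ofList (PySem.Chars.strip (PySem.List.slice s.toList (some ab.1) (some ab.2))))) = _
      rw [hc2, parts_eq]
    rw [hA, hB, pop_eq_finish _ hs, bSegs_cuts, ← specA_finish]
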